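-- pv_equiv track=rewrite | github.com/wynter598/ai_skill | sql-formatter/sql_aligner.py | align_comments
-- ===== SOURCE A (Python) =====
-- from typing import List, Tuple, Dict, Set, Optional
--
-- def _first_meaningful_char_col(line: str) -> int:
--     """整行 ``--`` 注释对齐用参考列（0-based）。
--
--     行首空白后：若恰好为 ``, `` + 单空格 + 非空白``，则返回该非空白字符列；否则返回行首第一个非空白字符列。
--     """
--     s = line.split("\n", 1)[0]
--     i = 0
--     n = len(s)
--     while i < n and s[i] in " \t":
--         i += 1
--     if i + 2 < n and s[i] == "," and s[i + 1] == " " and s[i + 2] not in " \t":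
--         return i + 2
--     return i
--
-- def align_comments(lines: List[str]) -> List[str]:
--     """对齐单独占一行的 ``--`` 注释。
--
--     规则：自当前行向下跳过空行与整行 ``--``（``strip().startswith('--')``）后取首条参考行；
--     若参考行仅为 ``(`` / ``)`` 则不改写；否则 ``--`` 起始列与 ``_first_meaningful_char_col`` 一致
--     （优先 ``, `` + 单空格后的首字符列，否则为参考行首非空白字符列）。可与 ``from`` 的 ``f`` 同列。
--     """
--     new_lines: List[str] = []
--
--     for i, line in enumerate(lines):
--         stripped = line.strip()
--         if not stripped.startswith("--"):
--             new_lines.append(line)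
--             continue
--
--         j = _next_meaningful_line_index(lines, i + 1)
--         if j is None:
--             new_lines.append(line)
--             continue
--
--         ref_line = lines[j]
--         ref_stripped = ref_line.strip()
--         if ref_stripped in ("(", ")"):
--             new_lines.append(line)
--             continue
--
--         target_col = _first_meaningful_char_col(ref_line)
--
--         has_newline = line.endswith("\n")
--         new_comment_line = " " * target_col + stripped
--         if has_newline and not new_comment_line.endswith("\n"):
--             new_comment_line += "\n"
--         elif not has_newline and new_comment_line.endswith("\n"):
--             new_comment_line = new_comment_line.rstrip("\n")
--         new_lines.append(new_comment_line)
--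
--     return new_lines
--
-- def _next_meaningful_line_index(lines: List[str], start: int) -> Optional[int]:
--     """自 ``start`` 起向下找首条非空且非整行 ``--`` 注释的行索引。"""
--     n = len(lines)
--     for j in range(start, n):
--         st = lines[j].strip()
--         if not st:
--             continue
--         if st.startswith("--"):
--             continue
--         return j
--     return None
-- ===== SOURCE B (Python) =====
-- from typing import List, Optional
--
-- def _first_meaningful_char_col(line: str) -> int:
--     s = line.split("\n", 1)[0]
--     i = 0
--     n = len(s)
--     while i < n and s[i] in " \t":
--         i += 1
--     if i + 2 < n and s[i] == "," and s[i + 1] == " " and s[i + 2] not in " \t":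
--         return i + 2
--     return i
--
-- def align_comments(lines: List[str]) -> List[str]:
--     # one backward pass; col is the target column of the next meaningful line
--     # (None when there is none yet or it is a bare paren line)
--     out = list(lines)
--     col: Optional[int] = None
--     for i in range(len(lines) - 1, -1, -1):
--         line = lines[i]
--         st = line.strip()
--         if not st:
--             continue
--         if st.startswith("--"):
--             if col is not None:
--                 new = " " * col + st
--                 out[i] = new + "\n" if line.endswith("\n") else new
--         else:
--             col = None if st in ("(", ")") else _first_meaningful_char_col(line)
--     return out
-- ===== Notes on version B (the rewrite author's own statement) =====
-- stated objective: alternative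
-- what changed: A rescans forward from every comment line for the next meaningful line and recomputes its column each time; B makes one backward pass over the lines, caching the target column of the most recent meaningful line, and rewrites each comment from that cache.
import Mathlib
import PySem

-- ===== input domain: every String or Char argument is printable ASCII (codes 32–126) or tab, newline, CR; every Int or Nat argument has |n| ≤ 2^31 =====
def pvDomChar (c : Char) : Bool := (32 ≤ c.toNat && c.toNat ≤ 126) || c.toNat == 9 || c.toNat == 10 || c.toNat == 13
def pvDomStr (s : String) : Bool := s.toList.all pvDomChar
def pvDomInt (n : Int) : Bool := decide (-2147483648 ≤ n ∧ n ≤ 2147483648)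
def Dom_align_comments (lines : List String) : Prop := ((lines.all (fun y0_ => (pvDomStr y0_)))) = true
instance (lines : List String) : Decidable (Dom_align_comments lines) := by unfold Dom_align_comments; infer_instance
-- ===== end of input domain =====

-- B replaces A's per-comment forward rescan for the next meaningful line by a single backward
-- pass that caches the target column (alternative single-pass structure); return values identical.

-- shared helper: port of _first_meaningful_char_col (used verbatim by both Source A and Source B)
-- while-loop skipping leading ' '/'\t' (structural recursion over the chars)
def fmcSkip : List Char → Nat
  | [] => 0
  | c :: rest => if c = ' ' ∨ c = '\t' then fmcSkip rest + 1 else 0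

-- line.split("\n", 1)[0] is exactly the chars before the first '\n' (takeWhile)
def fmcCol (line : String) : Nat :=
  let s := line.toList.takeWhile (fun c => c ≠ '\n')
  let n := s.length
  let i := fmcSkip s
  if i + 2 < n ∧ s[i]? = some ',' ∧ s[i+1]? = some ' ' ∧
      (s[i+2]?.any (fun c => decide (c ≠ ' ' ∧ c ≠ '\t'))) = true then
    i + 2
  else
    i

-- ===== PORT A =====
-- for j in range(start, n): skip blank / full-line '--' lines, return first other index
def nmiLoop (lines : List String) : List Nat → Option Nat
  | [] => none
  | j :: rest =>
    let st := PySem.Chars.strip (lines.getD j "").toList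
    if st = [] then nmiLoop lines rest
    else if PySem.Chars.startswith st ['-', '-'] then nmiLoop lines rest
    else some j

def nextMeaningfulLineIndex (lines : List String) (start : Nat) : Option Nat :=
  nmiLoop lines (List.range' start (lines.length - start))

-- loop body of A: the one string appended for (i, line)
def alignBodyA (lines : List String) (i : Nat) (line : String) : String :=
  let stripped := PySem.Chars.strip line.toList
  if ¬ PySem.Chars.startswith stripped ['-', '-'] then line
  else
    match nextMeaningfulLineIndex lines (i + 1) with
    | none => line
    | some j =>
      let refLine := lines.getD j ""
      let refStripped := PySem.Chars.strip refLine.toList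
      if refStripped = ['('] ∨ refStripped = [')'] then line
      else
        let targetCol := fmcCol refLine
        let hasNewline := PySem.Chars.endswith line.toList ['\n']
        let newC := List.replicate targetCol ' ' ++ stripped
        if hasNewline ∧ ¬ PySem.Chars.endswith newC ['\n'] then String.ofList (newC ++ ['\n'])
        else if ¬ hasNewline ∧ PySem.Chars.endswith newC ['\n'] then
          -- new_comment_line.rstrip("\n"): drop trailing '\n' chars (exact port, branch by hand)
          String.ofList (newC.reverse.dropWhile (fun c => c = '\n')).reverse
        else String.ofList newC

def align_comments (lines : List String) : List String :=
  lines.zipIdx.foldl (fun acc p => acc ++ [alignBodyA lines p.2 p.1]) []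

-- ===== PORT B =====
def align_comments_alt (lines : List String) : List String :=
  -- single backward pass (for i in range(n-1, -1, -1)) carrying the cached target column;
  -- out[i] assignments become consing the per-line result onto the already-built tail
  let p := lines.reverse.foldl
    (fun (p : List String × Option Nat) line =>
      let st := PySem.Chars.strip line.toList
      if st = [] then (line :: p.1, p.2)
      else if PySem.Chars.startswith st ['-', '-'] then
        match p.2 with
        | some col =>
          let newC := List.replicate col ' ' ++ st
          ((if PySem.Chars.endswith line.toList ['\n'] then String.ofList (newC ++ ['\n'])
            else String.ofList newC) :: p.1, p.2)
        | none => (line :: p.1, p.2)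
      else
        (line :: p.1, if st = ['('] ∨ st = [')'] then none else some (fmcCol line)))
    ([], none)
  p.1

-- ===== PRECONDITION & SPEC =====
def Spec_align_comments (lines : List String) (out : List String) : Prop := out = align_comments_alt lines
instance (lines : List String) (out : List String) : Decidable (Spec_align_comments lines out) := by unfold Spec_align_comments; infer_instance

-- ===== CLAIM (what is proved, stated in full; the proofs are below) =====
def Claim_equal_align_comments : Prop := ∀ (lines : List String), Dom_align_comments lines → Spec_align_comments lines (align_comments lines)

-- ===== LEMMAS AND PROOFS =====

-- first meaningful line (content) of a list, scanning from the front
def nmStr : List String → Option String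
  | [] => none
  | x :: rest =>
    let st := PySem.Chars.strip x.toList
    if st ≠ [] ∧ ¬ PySem.Chars.startswith st ['-', '-'] then some x else nmStr rest

-- the cached column B carries: target column of the first meaningful line, none for paren lines
def colOf (l : List String) : Option Nat :=
  match nmStr l with
  | none => none
  | some r =>
    if PySem.Chars.strip r.toList = ['('] ∨ PySem.Chars.strip r.toList = [')'] then none
    else some (fmcCol r)

-- what one backward step of B produces for a line, given the cached column of the lines after it
def bodyB (line : String) (c : Option Nat) : String :=
  let st := PySem.Chars.strip line.toList
  if st = [] then line
  else if PySem.Chars.startswith st ['-', '-'] then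
    match c with
    | some col =>
      let newC := List.replicate col ' ' ++ st
      if PySem.Chars.endswith line.toList ['\n'] then String.ofList (newC ++ ['\n'])
      else String.ofList newC
    | none => line
  else line

-- B's whole output, described from the front
def outB : List String → List String
  | [] => []
  | x :: rest => bodyB x (colOf rest) :: outB rest

theorem outB_length (l : List String) : (outB l).length = l.length := by
  induction l with
  | nil => rfl
  | cons x rest ih => simp [outB, ih]

theorem outB_getElem (l : List String) (i : Nat) (h : i < l.length) :
    (outB l)[i]'(lt_of_lt_of_eq h (outB_length l).symm) =
      bodyB (l[i]'h) (colOf (l.drop (i + 1))) := by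
  induction l generalizing i with
  | nil => simp at h
  | cons x rest ih =>
    cases i with
    | zero => simp [outB]
    | succ k => simpa [outB] using ih k (by simpa using h)

-- the index scan of A over range' s k (k = remaining length), mapped through lines.getD,
-- is the content scan nmStr on the suffix
theorem nmi_aux (lines : List String) : ∀ (k s : Nat), k = lines.length - s →
    (nmiLoop lines (List.range' s k)).map (fun j => lines.getD j "") = nmStr (lines.drop s) := by
  intro k
  induction k with
  | zero =>
    intro s hs
    rw [List.drop_eq_nil_of_le (by omega)]
    simp [nmiLoop, nmStr]
  | succ n ih =>
    intro s hs
    have hlt : s < lines.length := by omega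
    rw [List.range'_succ, List.drop_eq_getElem_cons hlt]
    simp only [nmiLoop, nmStr, List.getD_eq_getElem lines "" hlt]
    by_cases h1 : PySem.Chars.strip (lines[s]).toList = []
    · rw [if_pos h1, ih (s + 1) (by omega)]
      simp [h1]
    · rw [if_neg h1]
      by_cases h2 : PySem.Chars.startswith (PySem.Chars.strip (lines[s]).toList) ['-', '-'] = true
      · rw [if_pos h2, ih (s + 1) (by omega)]
        simp [h1, h2]
      · rw [if_neg h2]
        simp [h1, h2, List.getElem?_eq_getElem hlt]

theorem nmi_eq_nmStr (lines : List String) (s : Nat) :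
    (nextMeaningfulLineIndex lines s).map (fun j => lines.getD j "") = nmStr (lines.drop s) :=
  nmi_aux lines (lines.length - s) s rfl

-- the last char of a nonempty strip is not whitespace, so it is not '\n'
theorem endswith_replicate_strip (pre : List Char) (cs : List Char)
    (h : PySem.Chars.strip cs ≠ []) :
    PySem.Chars.endswith (pre ++ PySem.Chars.strip cs) ['\n'] = false := by
  rw [PySem.Chars.endswith, Bool.eq_false_iff]
  intro hsuf
  rw [List.isSuffixOf_iff_suffix] at hsuf
  obtain ⟨t, ht⟩ := hsuf
  have h1 : (pre ++ PySem.Chars.strip cs).getLast? = some '\n' := by rw [← ht]; simp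
  rw [List.getLast?_append_of_ne_nil pre h, List.getLast?_eq_some_getLast h] at h1
  have h4 : PySem.Chars.isspace ((PySem.Chars.strip cs).getLast h) = false := by
    simp only [PySem.Chars.strip, PySem.Chars.rstrip] at *
    rw [List.getLast_reverse]
    exact List.head_dropWhile_not PySem.Chars.isspace _
  rw [Option.some_inj.mp h1] at h4
  exact absurd h4 (by decide)

-- pointwise: A's loop body equals B's backward-step body fed the cached column
theorem bodyA_eq_bodyB (lines : List String) (i : Nat) (line : String) :
    alignBodyA lines i line = bodyB line (colOf (lines.drop (i + 1))) := by
  have hnm := nmi_eq_nmStr lines (i + 1)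
  unfold alignBodyA bodyB colOf
  by_cases hsw : PySem.Chars.startswith (PySem.Chars.strip line.toList) ['-', '-'] = true
  · have hne : PySem.Chars.strip line.toList ≠ [] := by
      intro he
      rw [he] at hsw
      exact absurd hsw (by decide)
    cases hmi : nextMeaningfulLineIndex lines (i + 1) with
    | none =>
      rw [hmi] at hnm
      simp only [Option.map_none] at hnm
      rw [← hnm]
      simp [hsw, hne]
    | some j =>
      rw [hmi] at hnm
      simp only [Option.map_some, List.getD_eq_getElem?_getD] at hnm
      rw [← hnm]
      simp only [hsw, hne, if_true]
      by_cases hp : PySem.Chars.strip ((lines[j]?).getD "").toList = ['('] ∨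
          PySem.Chars.strip ((lines[j]?).getD "").toList = [')']
      · simp [hp]
      · have hend := endswith_replicate_strip
          (List.replicate (fmcCol ((lines[j]?).getD "")) ' ') line.toList hne
        by_cases hnl : PySem.Chars.endswith line.toList ['\n'] = true
        · simp [hp, hnl, hend]
        · simp [hp, hnl, hend]
  · by_cases hst : PySem.Chars.strip line.toList = []
    · have hsw0 : PySem.Chars.startswith ([] : List Char) ['-', '-'] = false := by decide
      simp [hst, hsw0]
    · simp [hsw, hst]

-- skipped lines (blank or full-line comment) do not change the scan state
theorem nmStr_cons_skip (x : String) (rest : List String)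
    (h : PySem.Chars.strip x.toList = [] ∨
      PySem.Chars.startswith (PySem.Chars.strip x.toList) ['-', '-'] = true) :
    nmStr (x :: rest) = nmStr rest := by
  rcases h with h | h <;> simp [nmStr, h]

theorem colOf_cons_skip (x : String) (rest : List String)
    (h : PySem.Chars.strip x.toList = [] ∨
      PySem.Chars.startswith (PySem.Chars.strip x.toList) ['-', '-'] = true) :
    colOf (x :: rest) = colOf rest := by
  unfold colOf
  rw [nmStr_cons_skip x rest h]

theorem colOf_cons_meaningful (x : String) (rest : List String)
    (h1 : ¬ PySem.Chars.strip x.toList = [])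
    (h2 : ¬ PySem.Chars.startswith (PySem.Chars.strip x.toList) ['-', '-'] = true) :
    colOf (x :: rest) =
      if PySem.Chars.strip x.toList = ['('] ∨ PySem.Chars.strip x.toList = [')'] then none
      else some (fmcCol x) := by
  simp [colOf, nmStr, h1, h2]

-- B's backward fold computes (outB l, colOf l)
theorem foldB_eq (l : List String) :
    l.reverse.foldl
      (fun (p : List String × Option Nat) line =>
        let st := PySem.Chars.strip line.toList
        if st = [] then (line :: p.1, p.2)
        else if PySem.Chars.startswith st ['-', '-'] then
          match p.2 with
          | some col =>
            let newC := List.replicate col ' ' ++ st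
            ((if PySem.Chars.endswith line.toList ['\n'] then String.ofList (newC ++ ['\n'])
              else String.ofList newC) :: p.1, p.2)
          | none => (line :: p.1, p.2)
        else
          (line :: p.1, if st = ['('] ∨ st = [')'] then none else some (fmcCol line)))
      ([], none) = (outB l, colOf l) := by
  rw [List.foldl_reverse]
  induction l with
  | nil => rfl
  | cons x rest ih =>
    rw [List.foldr_cons, ih]
    by_cases h1 : PySem.Chars.strip x.toList = []
    · simp [outB, bodyB, h1, colOf_cons_skip x rest (Or.inl h1)]
    · by_cases h2 : PySem.Chars.startswith (PySem.Chars.strip x.toList) ['-', '-'] = true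
      · cases hc : colOf rest with
        | none => simp [outB, bodyB, h1, h2, hc, colOf_cons_skip x rest (Or.inr h2)]
        | some col => simp [outB, bodyB, h1, h2, hc, colOf_cons_skip x rest (Or.inr h2)]
      · simp [outB, bodyB, h1, h2, colOf_cons_meaningful x rest h1 h2]

-- ===== VERDICT (by name: the statement is the Claim_ definition above) =====
theorem align_comments_spec : Claim_equal_align_comments := by
  intro lines _
  unfold Spec_align_comments align_comments align_comments_alt
  rw [foldB_eq]
  rw [PySem.List.foldl_append_singleton_eq_map (fun p : String × Nat => alignBodyA lines p.2 p.1)]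
  simp only [List.nil_append]
  apply List.ext_getElem
  · simp [outB_length]
  · intro i h1 h2
    have hi : i < lines.length := by simpa [outB_length] using h2
    simp only [List.getElem_map, List.getElem_zipIdx]
    rw [bodyA_eq_bodyB, outB_getElem lines i hi]
    norm_num
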